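-- pv_equiv track=rewrite | github.com/Mominglobal-lab/ai-investment-lab | ai_models/regime_detection_model.py | _apply_persistence
-- ===== SOURCE A (Python) =====
-- def _apply_persistence(raw_labels: list[str], persistence_days: int) -> list[str]:
--     if not raw_labels:
--         return []
--     out = [raw_labels[0]]
--     candidate = raw_labels[0]
--     streak = 1
--     current = raw_labels[0]
--     for lbl in raw_labels[1:]:
--         if lbl == candidate:
--             streak += 1
--         else:
--             candidate = lbl
--             streak = 1
--         if candidate != current and streak >= persistence_days:
--             current = candidate
--         out.append(current)
--     return out
-- ===== SOURCE B (Python) =====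
-- def _apply_persistence(raw_labels: list[str], persistence_days: int) -> list[str]:
--     if not raw_labels:
--         return []
--     # run-length encode, newest run kept at the front
--     rruns = []
--     for lbl in raw_labels:
--         if rruns and rruns[0][0] == lbl:
--             rruns[0] = (lbl, rruns[0][1] + 1)
--         else:
--             rruns = [(lbl, 1)] + rruns
--     current = raw_labels[0]
--     out = [current]
--     first = True
--     for value, length in reversed(rruns):
--         # j is the 1-based streak position within the run; the very first
--         # element of the list is already emitted, so the first run starts at 2
--         for j in range(2 if first else 1, length + 1):
--             if value != current and j >= persistence_days:
--                 current = value
--             out.append(current)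
--         first = False
--     return out
-- ===== Notes on version B (the rewrite author's own statement) =====
-- stated objective: alternative
-- what changed: B first run-length encodes the labels into maximal (value, length) runs and then derives the output run by run from the within-run streak position, instead of A's single element-wise scan threading a candidate/streak/current state.
import Mathlib
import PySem

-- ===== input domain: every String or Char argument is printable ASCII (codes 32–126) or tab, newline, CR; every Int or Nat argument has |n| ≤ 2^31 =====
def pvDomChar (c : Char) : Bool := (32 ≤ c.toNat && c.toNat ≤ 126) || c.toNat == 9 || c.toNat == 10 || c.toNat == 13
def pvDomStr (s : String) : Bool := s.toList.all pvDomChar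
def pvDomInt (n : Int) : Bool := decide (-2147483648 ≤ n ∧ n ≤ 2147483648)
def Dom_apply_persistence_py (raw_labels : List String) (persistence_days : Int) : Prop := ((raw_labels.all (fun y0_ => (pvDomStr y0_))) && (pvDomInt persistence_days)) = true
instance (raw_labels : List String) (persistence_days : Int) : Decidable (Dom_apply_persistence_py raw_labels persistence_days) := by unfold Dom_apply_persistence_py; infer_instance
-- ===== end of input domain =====

-- B re-derives the answer from a run-length encoding of the labels (alternative decomposition, same cost); equivalence proved on all inputs.

-- ===== PORT A =====
-- step of A's loop: state = (out, candidate, streak, current)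
def stepA (p : Int) (st : List String × String × Int × String) (lbl : String) : List String × String × Int × String :=
  let cs : String × Int := if lbl == st.2.1 then (st.2.1, st.2.2.1 + 1) else (lbl, 1)
  let cur' := if cs.1 ≠ st.2.2.2 ∧ p ≤ cs.2 then cs.1 else st.2.2.2
  (st.1 ++ [cur'], cs.1, cs.2, cur')

def apply_persistence_py (raw_labels : List String) (persistence_days : Int) : List String :=
  match raw_labels with
  | [] => []
  | x :: rest => (rest.foldl (stepA persistence_days) ([x], x, 1, x)).1

-- ===== PORT B =====
-- run-length encoding step: newest run at the front (Python's rruns[0])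
def rleStep (rruns : List (String × Int)) (lbl : String) : List (String × Int) :=
  match rruns with
  | (v, k) :: t => if v == lbl then (lbl, k + 1) :: t else (lbl, 1) :: (v, k) :: t
  | [] => [(lbl, 1)]

-- inner loop over the streak positions j of one run; state = (out, current)
def innerStepB (p : Int) (v : String) (st2 : List String × String) (j : Int) : List String × String :=
  let current := if v ≠ st2.2 ∧ p ≤ j then v else st2.2
  (st2.1 ++ [current], current)

-- outer loop over the runs; state = (out, current, first)
def outerStepB (p : Int) (st : List String × String × Bool) (run : String × Int) : List String × String × Bool :=
  let inner := (PySem.List.pyRange (if st.2.2 then 2 else 1) (run.2 + 1) 1).foldl (innerStepB p run.1) (st.1, st.2.1)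
  (inner.1, inner.2, false)

def apply_persistence_py_alt (raw_labels : List String) (persistence_days : Int) : List String :=
  match raw_labels with
  | [] => []
  | x :: _ =>
    let rruns := raw_labels.foldl rleStep []
    (rruns.reverse.foldl (outerStepB persistence_days) ([x], x, true)).1

-- ===== PRECONDITION & SPEC =====
def Spec_apply_persistence_py (raw_labels : List String) (persistence_days : Int) (out : List String) : Prop := out = apply_persistence_py_alt raw_labels persistence_days
instance (raw_labels : List String) (persistence_days : Int) (out : List String) : Decidable (Spec_apply_persistence_py raw_labels persistence_days out) := by unfold Spec_apply_persistence_py; infer_instance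

-- ===== CLAIM (what is proved, stated in full; the proofs are below) =====
def Claim_equal_apply_persistence_py : Prop := ∀ (raw_labels : List String) (persistence_days : Int), Dom_apply_persistence_py raw_labels persistence_days → Spec_apply_persistence_py raw_labels persistence_days (apply_persistence_py raw_labels persistence_days)

-- ===== LEMMAS AND PROOFS =====

-- A's loop, output part, as a structural recursion
def specA (p : Int) : String → Int → String → List String → List String
  | _, _, _, [] => []
  | c, s, cur, l :: rest =>
    let cs : String × Int := if l == c then (c, s + 1) else (l, 1)
    let cur' := if cs.1 ≠ cur ∧ p ≤ cs.2 then cs.1 else cur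
    cur' :: specA p cs.1 cs.2 cur' rest

-- B's inner loop as a structural recursion over the list of j's
def emitJs (p : Int) (v : String) : String → List Int → List String × String
  | cur, [] => ([], cur)
  | cur, j :: js =>
    let cur' := if v ≠ cur ∧ p ≤ j then v else cur
    let r := emitJs p v cur' js
    (cur' :: r.1, r.2)

-- B's outer loop, output part, as a structural recursion over the runs
def emitRuns (p : Int) : Bool → String → List (String × Int) → List String
  | _, _, [] => []
  | first, cur, (v, m) :: rs =>
    let e := emitJs p v cur (PySem.List.pyRange (if first then 2 else 1) (m + 1) 1)
    e.1 ++ emitRuns p false e.2 rs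

-- B's emission when the scan is in the middle of a run of value v at streak k
def emitCont (p : Int) (v : String) (k : Int) (cur : String) : List (String × Int) → List String
  | [] => []
  | (w, m) :: t =>
    if w = v then
      let e := emitJs p v cur (PySem.List.pyRange (k + 1) (k + 1 + m) 1)
      e.1 ++ emitRuns p false e.2 t
    else emitRuns p false cur ((w, m) :: t)

-- in-order run-length encoding, recursive from the left
def consRun (l : String) : List (String × Int) → List (String × Int)
  | [] => [(l, 1)]
  | (v, k) :: t => if v == l then (l, k + 1) :: t else (l, 1) :: (v, k) :: t

def runsL : List String → List (String × Int)
  | [] => []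
  | x :: xs => consRun x (runsL xs)

def absorb (v : String) (k : Int) : List (String × Int) → List (String × Int)
  | [] => [(v, k)]
  | (w, m) :: t => if w = v then (v, k + m) :: t else (v, k) :: (w, m) :: t

theorem absorb_one (l : String) (rs : List (String × Int)) : absorb l 1 rs = consRun l rs := by
  cases rs with
  | nil => simp [absorb, consRun]
  | cons q t =>
    obtain ⟨w, m⟩ := q
    by_cases h : w = l
    · simp [absorb, consRun, h]; omega
    · simp [absorb, consRun, h]

theorem absorb_consRun_self (l : String) (k : Int) (rs : List (String × Int)) :
    absorb l k (consRun l rs) = absorb l (k + 1) rs := by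
  cases rs with
  | nil => simp [absorb, consRun]
  | cons q t =>
    obtain ⟨w, m⟩ := q
    by_cases h : w = l
    · simp [absorb, consRun, h]; omega
    · simp [absorb, consRun, h]

theorem absorb_consRun_ne (v l : String) (k : Int) (rs : List (String × Int)) (h : v ≠ l) :
    absorb v k (consRun l rs) = (v, k) :: consRun l rs := by
  cases rs with
  | nil => simp [absorb, consRun, Ne.symm h]
  | cons q t =>
    obtain ⟨w, m⟩ := q
    by_cases hw : w = l
    · simp [absorb, consRun, hw, Ne.symm h]
    · simp [absorb, consRun, hw, Ne.symm h]

theorem foldl_rleStep (ls : List String) : ∀ (acc : List (String × Int)) (v : String) (k : Int),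
    (List.foldl rleStep ((v, k) :: acc) ls).reverse = acc.reverse ++ absorb v k (runsL ls) := by
  induction ls with
  | nil => intro acc v k; simp [runsL, absorb]
  | cons l ls ih =>
    intro acc v k
    by_cases h : v = l
    · subst h
      simp only [List.foldl_cons, rleStep, beq_self_eq_true, if_true]
      rw [ih acc v (k + 1), runsL, absorb_consRun_self]
    · have hb : (v == l) = false := by simp [h]
      simp only [List.foldl_cons, rleStep, hb, Bool.false_eq_true, if_false]
      rw [ih ((v, k) :: acc) l 1, runsL, absorb_one, absorb_consRun_ne v l k _ h]
      simp

theorem rle_runs (x : String) (xs : List String) :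
    (List.foldl rleStep [] (x :: xs)).reverse = consRun x (runsL xs) := by
  simp only [List.foldl_cons, rleStep]
  rw [foldl_rleStep xs [] x 1, absorb_one]
  simp

theorem foldl_stepA (p : Int) (ls : List String) : ∀ (out : List String) (c : String) (s : Int) (cur : String),
    (ls.foldl (stepA p) (out, c, s, cur)).1 = out ++ specA p c s cur ls := by
  induction ls with
  | nil => intro out c s cur; simp [specA]
  | cons l ls ih =>
    intro out c s cur
    simp only [List.foldl_cons, stepA, specA]
    rw [ih]
    simp

theorem foldl_innerStepB (p : Int) (v : String) (js : List Int) : ∀ (out : List String) (cur : String),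
    js.foldl (innerStepB p v) (out, cur) = (out ++ (emitJs p v cur js).1, (emitJs p v cur js).2) := by
  induction js with
  | nil => intro out cur; simp [emitJs]
  | cons j js ih =>
    intro out cur
    simp only [List.foldl_cons, innerStepB, emitJs]
    rw [ih]
    simp

theorem foldl_outerStepB (p : Int) (runs : List (String × Int)) :
    ∀ (out : List String) (cur : String) (first : Bool),
    (runs.foldl (outerStepB p) (out, cur, first)).1 = out ++ emitRuns p first cur runs := by
  induction runs with
  | nil => intro out cur first; simp [emitRuns]
  | cons q rs ih =>
    intro out cur first
    obtain ⟨v, m⟩ := q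
    simp only [List.foldl_cons, outerStepB, emitRuns]
    rw [foldl_innerStepB, ih]
    simp

theorem consRun_pos (x : String) (rs : List (String × Int)) (h : ∀ r ∈ rs, (1 : Int) ≤ r.2) :
    ∀ q ∈ consRun x rs, (1 : Int) ≤ q.2 := by
  cases rs with
  | nil =>
    intro q hq
    simp [consRun] at hq
    subst hq
    norm_num
  | cons r t =>
    obtain ⟨w, m⟩ := r
    have hm : (1 : Int) ≤ m := by simpa using h (w, m) (by simp)
    intro q hq
    by_cases hw : w = x
    · subst hw
      simp [consRun] at hq
      rcases hq with hq | hq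
      · subst hq; show (1 : Int) ≤ m + 1; omega
      · exact h q (by simp [hq])
    · have hb : (w == x) = false := by simp [hw]
      simp [consRun, hb] at hq
      rcases hq with hq | hq | hq
      · subst hq; norm_num
      · subst hq; exact hm
      · exact h q (by simp [hq])

theorem runsL_pos (xs : List String) : ∀ q ∈ runsL xs, (1 : Int) ≤ q.2 := by
  induction xs with
  | nil => simp [runsL]
  | cons x xs ih => exact consRun_pos x (runsL xs) ih

theorem pyRange_two (m : Int) (hm : (0 : Int) ≤ m) :
    PySem.List.pyRange 1 (m + 1 + 1) 1 = (1 : Int) :: PySem.List.pyRange 2 (1 + 1 + m) 1 := by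
  rw [show (2 : Int) = 1 + 1 from by norm_num, show (1 : Int) + 1 + m = m + 1 + 1 from by omega,
    ← PySem.List.pyRange_one_cons (by omega)]

theorem emitCont_consRun_self (p : Int) (v : String) (k : Int) (cur : String)
    (rs : List (String × Int)) (hrs : ∀ q ∈ rs, (1 : Int) ≤ q.2) :
    emitCont p v k cur (consRun v rs) =
      (if v ≠ cur ∧ p ≤ k + 1 then v else cur) ::
        emitCont p v (k + 1) (if v ≠ cur ∧ p ≤ k + 1 then v else cur) rs := by
  set cur' := if v ≠ cur ∧ p ≤ k + 1 then v else cur with hcur'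
  cases rs with
  | nil =>
    have h1 : PySem.List.pyRange (k + 1) (k + 1 + 1) 1 = [k + 1] := PySem.List.pyRange_one_singleton _
    simp [consRun, emitCont, h1, emitJs, emitRuns, hcur']
  | cons q t =>
    obtain ⟨w, m⟩ := q
    have hm : (1 : Int) ≤ m := by simpa using hrs (w, m) (by simp)
    by_cases h : w = v
    · subst h
      have hsplit : PySem.List.pyRange (k + 1) (k + 1 + (m + 1)) 1
          = (k + 1) :: PySem.List.pyRange (k + 1 + 1) (k + 1 + 1 + m) 1 := by
        rw [show k + 1 + 1 + m = k + 1 + (m + 1) from by omega,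
          ← PySem.List.pyRange_one_cons (by omega)]
      simp only [consRun, beq_self_eq_true, if_true, emitCont, if_pos rfl, hsplit, emitJs]
      simp [hcur']
    · have hb : (w == v) = false := by simp [h]
      simp only [consRun, hb, Bool.false_eq_true, if_false, emitCont, if_pos rfl]
      have h1 : PySem.List.pyRange (k + 1) (k + 1 + 1) 1 = [k + 1] := PySem.List.pyRange_one_singleton _
      rw [h1]
      simp only [emitJs, emitCont, if_neg h]
      simp [hcur']

theorem emitCont_consRun_ne (p : Int) (v l : String) (k : Int) (cur : String)
    (rs : List (String × Int)) (hne : l ≠ v) (hrs : ∀ q ∈ rs, (1 : Int) ≤ q.2) :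
    emitCont p v k cur (consRun l rs) =
      (if l ≠ cur ∧ p ≤ (1 : Int) then l else cur) ::
        emitCont p l 1 (if l ≠ cur ∧ p ≤ (1 : Int) then l else cur) rs := by
  set cur' := if l ≠ cur ∧ p ≤ (1 : Int) then l else cur with hcur'
  have h1 : PySem.List.pyRange (1 : Int) 2 1 = [1] := by
    have h0 := PySem.List.pyRange_one_singleton (1 : Int)
    norm_num at h0
    exact h0
  cases rs with
  | nil =>
    simp only [consRun, emitCont, if_neg hne, emitRuns]
    simp [h1, emitJs, hcur']
  | cons q t =>
    obtain ⟨w, m⟩ := q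
    have hm : (1 : Int) ≤ m := by simpa using hrs (w, m) (by simp)
    by_cases h : w = l
    · subst h
      simp only [consRun, beq_self_eq_true, if_true, emitCont, if_neg hne, emitRuns,
        Bool.false_eq_true, if_false]
      rw [pyRange_two m (by omega)]
      simp [emitJs, hcur']
    · have hb : (w == l) = false := by simp [h]
      simp only [consRun, hb, Bool.false_eq_true, if_false, emitCont, if_neg hne, if_neg h, emitRuns]
      simp [h1, emitJs, hcur']

theorem specA_emitCont (p : Int) (xs : List String) : ∀ (v : String) (k : Int) (cur : String),
    specA p v k cur xs = emitCont p v k cur (runsL xs) := by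
  induction xs with
  | nil => intro v k cur; simp [specA, runsL, emitCont]
  | cons l xs ih =>
    intro v k cur
    simp only [runsL]
    by_cases h : l = v
    · subst h
      rw [emitCont_consRun_self p l k cur (runsL xs) (runsL_pos xs)]
      simp only [specA, beq_self_eq_true, if_true]
      rw [ih]
    · have hb : (l == v) = false := by simp [h]
      rw [emitCont_consRun_ne p v l k cur (runsL xs) h (runsL_pos xs)]
      simp only [specA, hb, Bool.false_eq_true, if_false]
      rw [ih]

theorem emitRuns_true_consRun (p : Int) (v cur : String) (rs : List (String × Int)) :
    emitRuns p true cur (consRun v rs) = emitCont p v 1 cur rs := by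
  have h2 : PySem.List.pyRange (2 : Int) 2 1 = [] := PySem.List.pyRange_one_eq_nil (by omega)
  cases rs with
  | nil =>
    simp [consRun, emitRuns, emitCont, emitJs, h2]
  | cons q t =>
    obtain ⟨w, m⟩ := q
    by_cases h : w = v
    · subst h
      have heq : PySem.List.pyRange (2 : Int) (m + 1 + 1) 1 = PySem.List.pyRange (1 + 1) (1 + 1 + m) 1 := by
        congr 1 <;> omega
      simp only [consRun, beq_self_eq_true, if_true, emitRuns, emitCont, if_pos rfl, heq]
    · have hb : (w == v) = false := by simp [h]
      simp [consRun, hb, emitRuns, emitCont, h, h2, emitJs]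

-- ===== VERDICT (by name: the statement is the Claim_ definition above) =====
theorem apply_persistence_py_spec : Claim_equal_apply_persistence_py := by
  intro raw_labels persistence_days _
  unfold Spec_apply_persistence_py
  cases raw_labels with
  | nil => rfl
  | cons x xs =>
    simp only [apply_persistence_py, apply_persistence_py_alt]
    rw [foldl_stepA]
    rw [show (List.foldl rleStep [] (x :: xs)).reverse = consRun x (runsL xs) from rle_runs x xs]
    rw [foldl_outerStepB, emitRuns_true_consRun, specA_emitCont]
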